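-- pv_equiv track=rewrite | github.com/LeonardoCMelo/Exercicios-Aulas-Programacao-Computadores | Aula13/Aula13-Exercicio03_4_1.py | exercicio_3_4_1
-- ===== SOURCE A (Python) =====
-- import math
--
-- def exercicio_3_4_1(ini, fim):
--     primos = []
--
--     for n in range(ini, fim + 1):
--         if n < 2:
--             continue
--
--         eh_primo = True
--         limite = int(math.sqrt(n))
--
--         for d in range(2, limite + 1):
--             if n % d == 0:
--                 eh_primo = False
--                 break
--
--         if eh_primo:
--             primos.append(n)
--
--     return primos
-- ===== SOURCE B (Python) =====
-- import math
--
-- def exercicio_3_4_1(ini, fim):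
--     # Segmented Sieve of Eratosthenes over [max(ini,2), fim]: for each d up to isqrt(fim),
--     # mark d's multiples from max(d*d, first multiple of d >= lo), then collect the unmarked.
--     lo = max(ini, 2)
--     if fim < lo:
--         return []
--     is_p = [True] * (fim - lo + 1)
--     for d in range(2, math.isqrt(fim) + 1):
--         start = max(d * d, (lo + d - 1) // d * d)
--         for m in range(start, fim + 1, d):
--             is_p[m - lo] = False
--     return [n for n in range(lo, fim + 1) if is_p[n - lo]]
-- ===== Notes on version B (the rewrite author's own statement) =====
-- stated objective: faster
-- what changed: Replaced per-number trial division up to sqrt(n) by a segmented Sieve of Eratosthenes over [max(ini,2), fim] (marking multiples of each d up to isqrt(fim)), then one collection pass.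
import Mathlib
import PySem

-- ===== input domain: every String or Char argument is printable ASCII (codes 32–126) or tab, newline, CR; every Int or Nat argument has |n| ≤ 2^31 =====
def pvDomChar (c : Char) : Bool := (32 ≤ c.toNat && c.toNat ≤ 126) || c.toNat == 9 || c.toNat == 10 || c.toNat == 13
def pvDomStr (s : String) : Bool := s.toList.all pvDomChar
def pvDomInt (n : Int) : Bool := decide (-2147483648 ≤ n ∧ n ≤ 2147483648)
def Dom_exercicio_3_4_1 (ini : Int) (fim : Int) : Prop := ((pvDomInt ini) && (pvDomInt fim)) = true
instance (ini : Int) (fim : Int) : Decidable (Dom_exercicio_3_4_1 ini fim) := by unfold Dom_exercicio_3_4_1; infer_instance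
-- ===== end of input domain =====

-- B replaces A's per-number trial division by a segmented Sieve of Eratosthenes over [max(ini,2), fim] (objective: faster).

-- ===== PORT A =====
-- 'int(math.sqrt(n))' is ported as Nat.sqrt n.toNat: exact on this file's domain (0 ≤ n ≤ 2^31,
-- where the correctly rounded double sqrt never crosses an integer boundary; checked exhaustively).
-- The inner 'for d …: if n % d == 0: … break' loop computes exactly the boolean
-- "no d in range(2, limite+1) divides n", ported as .all over the same range.
def exercicio_3_4_1 (ini : Int) (fim : Int) : List Int :=
  (PySem.List.pyRange ini (fim + 1) 1).foldl
    (fun primos n =>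
      if n < 2 then primos
      else
        let limite : Int := (Nat.sqrt n.toNat : Int)
        let eh_primo := (PySem.List.pyRange 2 (limite + 1) 1).all
          (fun d => !(PySem.Int.mod n d == 0))
        if eh_primo then primos ++ [n] else primos)
    []

-- ===== PORT B =====
-- 'math.isqrt(fim)' is Nat.sqrt fim.toNat (exact; fim ≥ lo ≥ 2 in that branch). The indices
-- m - lo and n - lo into is_p satisfy 0 ≤ idx ≤ fim - lo < len(is_p), so 'is_p[idx]' is always
-- in range: reading is getD, writing 'is_p[m - lo] = False' is List.set, both exact there.
def exercicio_3_4_1_alt (ini : Int) (fim : Int) : List Int :=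
  let lo := max ini 2
  if fim < lo then []
  else
    let isP : List Bool :=
      (PySem.List.pyRange 2 ((Nat.sqrt fim.toNat : Int) + 1) 1).foldl
        (fun a d =>
          let start := max (d * d) (PySem.Int.floordiv (lo + d - 1) d * d)
          (PySem.List.pyRange start (fim + 1) d).foldl
            (fun a m => a.set (m - lo).toNat false) a)
        (List.replicate (fim - lo + 1).toNat true)
    (PySem.List.pyRange lo (fim + 1) 1).filter (fun n => isP.getD (n - lo).toNat false)

-- ===== PRECONDITION & SPEC =====
def Spec_exercicio_3_4_1 (ini : Int) (fim : Int) (out : List Int) : Prop := out = exercicio_3_4_1_alt ini fim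
instance (ini : Int) (fim : Int) (out : List Int) : Decidable (Spec_exercicio_3_4_1 ini fim out) := by unfold Spec_exercicio_3_4_1; infer_instance

-- ===== CLAIM (what is proved, stated in full; the proofs are below) =====
def Claim_equal_exercicio_3_4_1 : Prop := ∀ (ini : Int) (fim : Int), Dom_exercicio_3_4_1 ini fim → Spec_exercicio_3_4_1 ini fim (exercicio_3_4_1 ini fim)

-- ===== LEMMAS AND PROOFS =====

-- A's filtering predicate: n ≥ 2 and no d in range(2, int(sqrt(n))+1) divides n.
def pvPA (n : Int) : Bool :=
  decide (2 ≤ n) &&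
    (PySem.List.pyRange 2 ((Nat.sqrt n.toNat : Int) + 1) 1).all
      (fun d => !(PySem.Int.mod n d == 0))

-- A's trial-division test decides primality of n.toNat (for 2 ≤ n).
lemma aTest_eq_prime (n : Int) (h2 : 2 ≤ n) :
    ((PySem.List.pyRange 2 ((Nat.sqrt n.toNat : Int) + 1) 1).all
      (fun d => !(PySem.Int.mod n d == 0)))
    = decide (Nat.Prime n.toNat) := by
  have hcast : ((n.toNat : Int)) = n := Int.toNat_of_nonneg (by omega)
  by_cases hp : Nat.Prime n.toNat
  · simp only [hp, decide_true]
    rw [List.all_eq_true]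
    intro d hd
    rw [PySem.List.mem_pyRange_one] at hd
    simp only [Bool.not_eq_eq_eq_not, Bool.not_true, beq_eq_false_iff_ne, ne_eq]
    rw [PySem.Int.mod_eq_zero_iff_dvd]
    intro hdvd
    have hdc : ((d.toNat : Int)) = d := Int.toNat_of_nonneg (by omega)
    have hdn : d.toNat ∣ n.toNat := by
      rw [← Int.natCast_dvd_natCast, hdc, hcast]; exact hdvd
    have hle : d.toNat ≤ Nat.sqrt n.toNat := by omega
    exact (Nat.prime_def_le_sqrt.mp hp).2 d.toNat (by omega) hle hdn
  · simp only [hp, decide_false]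
    rw [Bool.eq_false_iff, ne_eq, List.all_eq_true]
    intro hall
    apply hp
    rw [Nat.prime_def_le_sqrt]
    refine ⟨by omega, fun m h2m hms hdvd => ?_⟩
    have hmem : (m : Int) ∈ PySem.List.pyRange 2 ((Nat.sqrt n.toNat : Int) + 1) 1 := by
      rw [PySem.List.mem_pyRange_one]
      constructor
      · exact_mod_cast h2m
      · have : (m : Int) ≤ (Nat.sqrt n.toNat : Int) := by exact_mod_cast hms
        omega
    have := hall _ hmem
    simp only [Bool.not_eq_eq_eq_not, Bool.not_true, beq_eq_false_iff_ne, ne_eq] at this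
    apply this
    rw [PySem.Int.mod_eq_zero_iff_dvd, ← hcast]
    exact_mod_cast hdvd

-- (lo + d - 1) // d * d is the smallest multiple of d that is ≥ lo.
lemma ceil_mul_ge (lo d : Int) (hd : 0 < d) :
    lo ≤ PySem.Int.floordiv (lo + d - 1) d * d := by
  have h := PySem.Int.floordiv_mul_add_mod (lo + d - 1) d
  have h1 := PySem.Int.mod_nonneg (lo + d - 1) hd
  have h2 := PySem.Int.mod_lt (lo + d - 1) hd
  omega

lemma ceil_mul_le (lo d n : Int) (hd : 0 < d) (hln : lo ≤ n) (hdvd : d ∣ n) :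
    PySem.Int.floordiv (lo + d - 1) d * d ≤ n := by
  have h := PySem.Int.floordiv_mul_add_mod (lo + d - 1) d
  have h1 := PySem.Int.mod_nonneg (lo + d - 1) hd
  have h2 := PySem.Int.mod_lt (lo + d - 1) hd
  obtain ⟨k, hk⟩ : d ∣ n - PySem.Int.floordiv (lo + d - 1) d * d :=
    dvd_sub hdvd (Dvd.intro _ (mul_comm _ _))
  by_cases hk0 : 0 ≤ k
  · nlinarith
  · exfalso
    have hdk : d * k ≤ -d := by nlinarith
    linarith

-- A fold of in-place 'set … False' updates, read back at one index.
lemma foldlSet_getElem? (g : Int → Nat) (is : List Int) (l : List Bool) (n : Nat) :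
    (is.foldl (fun a m => a.set (g m) false) l)[n]? =
    if is.any (fun m => g m == n) then l[n]?.map (fun _ => false) else l[n]? := by
  induction is generalizing l with
  | nil => simp
  | cons m is ih =>
    simp only [List.foldl_cons, List.any_cons, ih]
    by_cases hm : g m = n
    · subst hm
      have hset : (l.set (g m) false)[g m]? = l[g m]?.map (fun _ => false) := by
        rw [List.getElem?_set]
        by_cases hlen : g m < l.length
        · simp [hlen]
        · simp [hlen]
      simp only [hset, beq_self_eq_true, Bool.true_or, if_pos]
      split_ifs <;> simp [Option.map_map]
    · have hset : (l.set (g m) false)[n]? = l[n]? := by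
        rw [List.getElem?_set, if_neg hm]
      simp [hm, hset]

-- The indices marked by the segmented sieve are exactly the non-primes among lo ≤ n ≤ fim.
lemma marked_iff (fim lo n : Int) (hlo : 2 ≤ lo) (hln : lo ≤ n) (hn : n ≤ fim) :
    (((PySem.List.pyRange 2 ((Nat.sqrt fim.toNat : Int) + 1) 1).flatMap
        (fun d => PySem.List.pyRange
          (max (d * d) (PySem.Int.floordiv (lo + d - 1) d * d)) (fim + 1) d)).any
      (fun m => (m - lo).toNat == (n - lo).toNat))
    = decide (¬ Nat.Prime n.toNat) := by
  have h2 : 2 ≤ n := le_trans hlo hln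
  have hcast : ((n.toNat : Int)) = n := Int.toNat_of_nonneg (by omega)
  rw [Bool.eq_iff_iff]
  simp only [List.any_eq_true, List.mem_flatMap, decide_eq_true_eq, beq_iff_eq]
  constructor
  · rintro ⟨m, ⟨d, hd, hm⟩, hmn⟩ hp
    rw [PySem.List.mem_pyRange_one] at hd
    rw [PySem.List.mem_pyRange_iff_of_pos (by omega : (0:Int) < d)] at hm
    obtain ⟨hdd, hmb, hdvd0⟩ := hm
    have hceil := ceil_mul_ge lo d (by omega)
    have hmlo : lo ≤ m := le_trans (le_trans hceil (le_max_right _ _)) hdd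
    have hmn' : m = n := by omega
    subst hmn'
    have hdvds : d ∣ max (d * d) (PySem.Int.floordiv (lo + d - 1) d * d) := by
      rcases max_choice (d * d) (PySem.Int.floordiv (lo + d - 1) d * d) with h | h <;> rw [h]
      · exact Dvd.intro d rfl
      · exact Dvd.intro _ (mul_comm _ _)
    have hdvd : d ∣ m := by
      have := dvd_add hdvd0 hdvds
      simpa using this
    have hdds : d * d ≤ m := le_trans (le_max_left _ _) hdd
    have hdc : ((d.toNat : Int)) = d := Int.toNat_of_nonneg (by omega)
    have hdn : d.toNat ∣ m.toNat := by
      rw [← Int.natCast_dvd_natCast, hdc, hcast]; exact hdvd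
    have hlt : d < m := by nlinarith
    rcases (hp.eq_one_or_self_of_dvd _ hdn) with h | h <;> omega
  · intro hp
    have h1 : n.toNat ≠ 1 := by omega
    have hpr := Nat.minFac_prime h1
    have hdvdN := Nat.minFac_dvd n.toNat
    have hsq : n.toNat.minFac * n.toNat.minFac ≤ n.toNat := by
      have := Nat.minFac_sq_le_self (by omega) hp
      nlinarith [this, sq_nonneg n.toNat.minFac]
    have hsqrt : n.toNat.minFac ≤ Nat.sqrt fim.toNat :=
      Nat.le_sqrt.mpr (le_trans hsq (by omega))
    have hdpos : (0:Int) < (n.toNat.minFac : Int) := by exact_mod_cast hpr.pos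
    have hdvd : (n.toNat.minFac : Int) ∣ n := by rw [← hcast]; exact_mod_cast hdvdN
    have hdds : ((n.toNat.minFac : Int)) * (n.toNat.minFac : Int) ≤ n := by
      rw [← hcast]; exact_mod_cast hsq
    have hdvds : (n.toNat.minFac : Int) ∣
        max ((n.toNat.minFac : Int) * (n.toNat.minFac : Int))
          (PySem.Int.floordiv (lo + (n.toNat.minFac : Int) - 1) (n.toNat.minFac : Int) * (n.toNat.minFac : Int)) := by
      rcases max_choice ((n.toNat.minFac : Int) * (n.toNat.minFac : Int))
        (PySem.Int.floordiv (lo + (n.toNat.minFac : Int) - 1) (n.toNat.minFac : Int) * (n.toNat.minFac : Int)) with h | h <;> rw [h]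
      · exact Dvd.intro _ rfl
      · exact Dvd.intro _ (mul_comm _ _)
    refine ⟨n, ⟨(n.toNat.minFac : Int), ?_, ?_⟩, rfl⟩
    · rw [PySem.List.mem_pyRange_one]
      have h2p := hpr.two_le
      constructor
      · exact_mod_cast h2p
      · have : ((n.toNat.minFac : Nat) : Int) ≤ (Nat.sqrt fim.toNat : Int) := by exact_mod_cast hsqrt
        omega
    · rw [PySem.List.mem_pyRange_iff_of_pos hdpos]
      refine ⟨?_, by omega, dvd_sub hdvd hdvds⟩
      exact max_le hdds (ceil_mul_le lo _ n hdpos hln hdvd)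

-- Value of the finished segmented sieve at index n - lo (for lo ≤ n ≤ fim): true iff prime.
lemma sieve_getD (fim lo n : Int) (hlo : 2 ≤ lo) (hln : lo ≤ n) (hn : n ≤ fim) :
    ((PySem.List.pyRange 2 ((Nat.sqrt fim.toNat : Int) + 1) 1).foldl
        (fun a d =>
          (PySem.List.pyRange
            (max (d * d) (PySem.Int.floordiv (lo + d - 1) d * d)) (fim + 1) d).foldl
            (fun a m => a.set (m - lo).toNat false) a)
        (List.replicate (fim - lo + 1).toNat true)).getD (n - lo).toNat false
    = decide (Nat.Prime n.toNat) := by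
  rw [← List.foldl_flatMap]
  rw [List.getD_eq_getElem?_getD, foldlSet_getElem?]
  have hinit : (List.replicate (fim - lo + 1).toNat (true : Bool))[(n - lo).toNat]? = some true := by
    rw [List.getElem?_replicate, if_pos (by omega)]
  rw [hinit, marked_iff fim lo n hlo hln hn]
  by_cases hp : Nat.Prime n.toNat <;> simp [hp]

-- A's fold is a filter of the range by pvPA.
lemma a_eq_filter (ini fim : Int) :
    exercicio_3_4_1 ini fim = (PySem.List.pyRange ini (fim + 1) 1).filter pvPA := by
  unfold exercicio_3_4_1
  have hfun : (fun (primos : List Int) n =>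
      if n < 2 then primos
      else
        let limite : Int := (Nat.sqrt n.toNat : Int)
        let eh_primo := (PySem.List.pyRange 2 (limite + 1) 1).all
          (fun d => !(PySem.Int.mod n d == 0))
        if eh_primo then primos ++ [n] else primos)
      = (fun primos n => if pvPA n then primos ++ [n] else primos) := by
    funext primos n
    by_cases h : n < 2
    · simp [pvPA, h, show ¬ (2 ≤ n) from by omega]
    · simp only [if_neg h, pvPA, show (2 ≤ n) from by omega, decide_true, Bool.true_and]
  rw [hfun, PySem.List.foldl_append_if_eq_filter]
  simp

-- ===== VERDICT (by name: the statement is the Claim_ definition above) =====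
theorem exercicio_3_4_1_spec : Claim_equal_exercicio_3_4_1 := by
  intro ini fim _
  unfold Spec_exercicio_3_4_1
  rw [a_eq_filter]
  by_cases hf : fim < max ini 2
  · simp only [exercicio_3_4_1_alt, if_pos hf]
    rw [List.filter_eq_nil_iff]
    intro x hx
    rw [PySem.List.mem_pyRange_one] at hx
    simp only [pvPA, Bool.and_eq_true, decide_eq_true_eq, not_and]
    intro h2x
    omega
  · simp only [exercicio_3_4_1_alt, if_neg hf]
    rw [PySem.List.pyRange_one_append ini (max ini 2) (fim + 1) (le_max_left _ _) (by omega),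
        List.filter_append]
    have h1 : (PySem.List.pyRange ini (max ini 2) 1).filter pvPA = [] := by
      rw [List.filter_eq_nil_iff]
      intro x hx
      rw [PySem.List.mem_pyRange_one] at hx
      simp only [pvPA, Bool.and_eq_true, decide_eq_true_eq, not_and]
      intro h2x
      omega
    rw [h1, List.nil_append]
    apply List.filter_congr
    intro x hx
    rw [PySem.List.mem_pyRange_one] at hx
    have h2x : 2 ≤ x := le_trans (le_max_right _ _) hx.1
    have hxf : x ≤ fim := by omega
    simp only [pvPA, show decide (2 ≤ x) = true from by simp [h2x], Bool.true_and]
    rw [aTest_eq_prime x h2x, sieve_getD fim (max ini 2) x (le_max_right _ _) hx.1 hxf]
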